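-- pv_equiv track=rewrite | github.com/lingpy/linse | src/linse/transform.py | _iter_syllables
-- ===== SOURCE A (Python) =====
-- def _iter_syllables(
--         sequence, prosodies, vowels=(7,), tones=(8,), max_vowels=2):
--     """
--     Find syllable breakpoints for a set of tokens, based on their prosody.
--
--     :param vowels: all numbers that represent a vowel class
--     :param tones: all tones reresenting a tone class
--     :param max_vowels: start new syllable if maximum of vowels is reached
--
--     :note: Vowels need to be presence in a syllable, which is why they are
--     assigned a specific value (default 7, as in the "art" sound class model).
--     If more complex prosodic models are used, one needs to indicate what is a
--     vowel, and also what class is reserved for a tone.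
--     """
--     tuples = [('#', 0)] + list(zip(sequence, prosodies)) + [('$', 0)]
--     syllable, vowel_count = [], 0
--     for i, (char, pro) in enumerate(tuples[1:-1], start=1):
--         pchar, ppro = tuples[i - 1]
--         fchar, fpro = tuples[i + 1]
--         if pro in vowels:
--             vowel_count += 1
--         if fpro not in tones:
--             if (ppro >= pro < fpro and vowel_count and 7 in prosodies[i:]) or\
--                     ppro in tones:
--                 yield syllable
--                 syllable, vowel_count = [], 0
--             elif vowel_count > max_vowels and pro in vowels:
--                 yield syllable
--                 syllable, vowel_count = [], 0
--             elif ppro in vowels and pro not in vowels and fpro > pro: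
--                 yield syllable
--                 syllable, vowel_count = [], 0
--
--         syllable.append(char)
--     if syllable:
--         yield syllable
-- ===== SOURCE B (Python) =====
-- def _iter_syllables(
--         sequence, prosodies, vowels=(7,), tones=(8,), max_vowels=2):
--     """Faster single-pass version: the repeated `7 in prosodies[i:]` scan is
--     replaced by a suffix-presence table built once, and syllables are yielded
--     as slices of the input between breakpoints."""
--     vset, tset = frozenset(vowels), frozenset(tones)
--     m = min(len(sequence), len(prosodies))
--     # has7[j] is True iff 7 occurs in prosodies[j:]
--     has7 = [False] * (len(prosodies) + 1)
--     for j in range(len(prosodies) - 1, -1, -1):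
--         has7[j] = prosodies[j] == 7 or has7[j + 1]
--     start, vowel_count = 0, 0
--     for j in range(m):
--         pro = prosodies[j]
--         ppro = prosodies[j - 1] if j > 0 else 0
--         fpro = prosodies[j + 1] if j + 1 < m else 0
--         if pro in vset:
--             vowel_count += 1
--         if fpro not in tset and (
--                 (ppro >= pro < fpro and vowel_count and has7[j + 1])
--                 or ppro in tset
--                 or (vowel_count > max_vowels and pro in vset)
--                 or (ppro in vset and pro not in vset and fpro > pro)):
--             yield sequence[start:j]
--             start, vowel_count = j, 0
--     if start < m:
--         yield sequence[start:m]
-- ===== Notes on version B (the rewrite author's own statement) =====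
-- stated objective: faster
-- what changed: B precomputes a suffix table has7[j] = (7 occurs in prosodies[j:]) once, replacing A's O(n) rescan of prosodies[i:] in every iteration, and yields each syllable as a slice of the input between breakpoints instead of appending token by token.
import Mathlib
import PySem

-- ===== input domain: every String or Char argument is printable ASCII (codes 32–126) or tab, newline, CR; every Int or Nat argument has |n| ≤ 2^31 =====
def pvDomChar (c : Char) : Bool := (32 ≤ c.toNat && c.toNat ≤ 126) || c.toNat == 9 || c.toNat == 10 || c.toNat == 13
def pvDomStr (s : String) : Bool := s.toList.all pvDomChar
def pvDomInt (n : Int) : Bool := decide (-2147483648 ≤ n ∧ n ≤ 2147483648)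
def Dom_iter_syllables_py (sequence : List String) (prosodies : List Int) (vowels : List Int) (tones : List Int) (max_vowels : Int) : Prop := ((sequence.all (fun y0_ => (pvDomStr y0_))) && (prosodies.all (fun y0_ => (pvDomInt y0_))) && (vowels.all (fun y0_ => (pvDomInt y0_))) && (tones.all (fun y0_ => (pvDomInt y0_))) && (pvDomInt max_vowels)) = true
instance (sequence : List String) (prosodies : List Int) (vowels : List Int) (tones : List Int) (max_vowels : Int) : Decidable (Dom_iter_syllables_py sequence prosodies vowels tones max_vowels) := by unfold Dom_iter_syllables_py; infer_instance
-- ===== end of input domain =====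

-- B replaces A's repeated `7 in prosodies[i:]` suffix rescans with a suffix-presence
-- table built once, and yields each syllable as a slice between breakpoints.

-- ===== PORT A =====
-- A's loop body; state = (yielded syllables, current syllable, vowel_count)
def pvStepA (tuples : List (String × Int)) (prosodies : List Int) (vowels : List Int)
    (tones : List Int) (max_vowels : Int)
    (st : List (List String) × List String × Int) (icp : Int × String × Int) :
    List (List String) × List String × Int :=
  let i := icp.1
  let char := icp.2.1
  let pro := icp.2.2
  let ppro := (PySem.List.pyGetD tuples (i - 1) ("", 0)).2
  let fpro := (PySem.List.pyGetD tuples (i + 1) ("", 0)).2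
  let vc := if pro ∈ vowels then st.2.2 + 1 else st.2.2
  let st' :=
    if fpro ∉ tones then
      if (ppro ≥ pro ∧ pro < fpro ∧ vc ≠ 0 ∧ (7:Int) ∈ PySem.List.slice prosodies (some i) none) ∨ ppro ∈ tones then
        (st.1 ++ [st.2.1], ([] : List String), (0:Int))
      else if vc > max_vowels ∧ pro ∈ vowels then
        (st.1 ++ [st.2.1], ([] : List String), (0:Int))
      else if ppro ∈ vowels ∧ pro ∉ vowels ∧ fpro > pro then
        (st.1 ++ [st.2.1], ([] : List String), (0:Int))
      else (st.1, st.2.1, vc)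
    else (st.1, st.2.1, vc)
  (st'.1, st'.2.1 ++ [char], st'.2.2)

def iter_syllables_py (sequence : List String) (prosodies : List Int) (vowels : List Int) (tones : List Int) (max_vowels : Int) : List (List String) :=
  let tuples : List (String × Int) := [("#", (0:Int))] ++ sequence.zip prosodies ++ [("$", (0:Int))]
  let st := (PySem.List.enumerate (PySem.List.slice tuples (some 1) (some (-1))) 1).foldl
      (pvStepA tuples prosodies vowels tones max_vowels) ([], [], 0)
  if st.2.1 ≠ [] then st.1 ++ [st.2.1] else st.1

-- ===== PORT B =====
-- has7[j] = (7 occurs in prosodies[j:]), built once right-to-left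
def pvSuffix7 : List Int → List Bool
  | [] => [false]
  | p :: ps =>
    let r := pvSuffix7 ps
    (decide (p = 7) || r.headD false) :: r

-- B's loop body; state = (yielded syllables, start index of current syllable, vowel_count)
def pvStepB (sequence : List String) (prosodies : List Int) (vowels : PySem.Set Int)
    (tones : PySem.Set Int) (max_vowels : Int) (m : Int) (has7 : List Bool)
    (st : List (List String) × Int × Int) (j : Int) :
    List (List String) × Int × Int :=
  let pro := PySem.List.pyGetD prosodies j 0
  let ppro := if 0 < j then PySem.List.pyGetD prosodies (j - 1) 0 else 0
  let fpro := if j + 1 < m then PySem.List.pyGetD prosodies (j + 1) 0 else 0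
  let vc := if pro ∈ vowels then st.2.2 + 1 else st.2.2
  if fpro ∉ tones ∧
      ((ppro ≥ pro ∧ pro < fpro ∧ vc ≠ 0 ∧ PySem.List.pyGetD has7 (j + 1) false = true)
        ∨ ppro ∈ tones
        ∨ (vc > max_vowels ∧ pro ∈ vowels)
        ∨ (ppro ∈ vowels ∧ pro ∉ vowels ∧ fpro > pro)) then
    (st.1 ++ [PySem.List.slice sequence (some st.2.1) (some j)], j, 0)
  else (st.1, st.2.1, vc)

def iter_syllables_py_alt (sequence : List String) (prosodies : List Int) (vowels : List Int) (tones : List Int) (max_vowels : Int) : List (List String) :=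
  let vset := PySem.Set.ofList vowels
  let tset := PySem.Set.ofList tones
  let m : Int := min sequence.length prosodies.length
  let has7 := pvSuffix7 prosodies
  let st := (PySem.List.pyRange 0 m 1).foldl
      (pvStepB sequence prosodies vset tset max_vowels m has7) ([], 0, 0)
  if st.2.1 < m then st.1 ++ [PySem.List.slice sequence (some st.2.1) (some m)] else st.1

-- ===== PRECONDITION & SPEC =====
def Spec_iter_syllables_py (sequence : List String) (prosodies : List Int) (vowels : List Int) (tones : List Int) (max_vowels : Int) (out : List (List String)) : Prop := out = iter_syllables_py_alt sequence prosodies vowels tones max_vowels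
instance (sequence : List String) (prosodies : List Int) (vowels : List Int) (tones : List Int) (max_vowels : Int) (out : List (List String)) : Decidable (Spec_iter_syllables_py sequence prosodies vowels tones max_vowels out) := by unfold Spec_iter_syllables_py; infer_instance

-- ===== CLAIM (what is proved, stated in full; the proofs are below) =====
def Claim_equal_iter_syllables_py : Prop := ∀ (sequence : List String) (prosodies : List Int) (vowels : List Int) (tones : List Int) (max_vowels : Int), Dom_iter_syllables_py sequence prosodies vowels tones max_vowels → Spec_iter_syllables_py sequence prosodies vowels tones max_vowels (iter_syllables_py sequence prosodies vowels tones max_vowels)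

-- ===== LEMMAS AND PROOFS =====

-- the has7 table is exactly suffix membership of 7
lemma pvSuffix7_getD (p : List Int) : ∀ (k : Nat), k ≤ p.length →
    (pvSuffix7 p).getD k false = decide ((7:Int) ∈ p.drop k) := by
  induction p with
  | nil =>
    intro k hk
    have : k = 0 := by simpa using hk
    subst this; simp [pvSuffix7]
  | cons x xs ih =>
    intro k hk
    cases k with
    | zero =>
      have h0 := ih 0 (by omega)
      have hh : (pvSuffix7 xs).headD false = (pvSuffix7 xs).getD 0 false := by
        cases pvSuffix7 xs <;> simp
      simp only [pvSuffix7, List.getD_cons_zero]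
      rw [hh, h0]
      by_cases h7 : x = 7
      · simp [h7]
      · simp [h7, List.mem_cons, Ne.symm h7]
    | succ n =>
      simp only [pvSuffix7, List.getD_cons_succ, List.drop_succ_cons]
      exact ih n (by simpa using hk)

-- one loop iteration: A's state (out, syllable, vc) matches B's (out, start, vc)
set_option maxHeartbeats 2000000 in
lemma pv_step (s : List String) (p vw tn : List Int) (mv : Int)
    (j a : Nat) (out : List (List String)) (vc : Int)
    (hj : j < (s.zip p).length) (ha : a ≤ j) :
    ∃ a' : Nat, a' ≤ j + 1 ∧
      pvStepB s p (PySem.Set.ofList vw) (PySem.Set.ofList tn) mv (((s.zip p).length : Int)) (pvSuffix7 p) (out, (a:Int), vc) (j:Int)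
        = ((pvStepA ([("#", (0:Int))] ++ s.zip p ++ [("$", (0:Int))]) p vw tn mv
              (out, List.take (j-a) (List.drop a s), vc)
              (((j:Int)+1, (s.zip p)[j]))).1,
           (a':Int),
           (pvStepA ([("#", (0:Int))] ++ s.zip p ++ [("$", (0:Int))]) p vw tn mv
              (out, List.take (j-a) (List.drop a s), vc)
              (((j:Int)+1, (s.zip p)[j]))).2.2)
      ∧ (pvStepA ([("#", (0:Int))] ++ s.zip p ++ [("$", (0:Int))]) p vw tn mv
            (out, List.take (j-a) (List.drop a s), vc)
            (((j:Int)+1, (s.zip p)[j]))).2.1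
          = List.take ((j+1)-a') (List.drop a' s) := by
  have hzl : (s.zip p).length = min s.length p.length := List.length_zip
  have hjs : j < s.length := by omega
  have hjp : j < p.length := by omega
  have hget : (s.zip p)[j] = (s[j], p[j]) := List.getElem_zip
  -- A's ppro equals B's ppro
  have hppro : (PySem.List.pyGetD ([("#", (0:Int))] ++ s.zip p ++ [("$", (0:Int))]) (((j:Int)+1) - 1) ("", 0)).2
      = (if 0 < (j:Int) then PySem.List.pyGetD p ((j:Int) - 1) 0 else 0) := by
    rw [show ((j:Int)+1) - 1 = ((j:Nat):Int) by ring, PySem.List.pyGetD_natCast]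
    cases j with
    | zero => simp
    | succ jj =>
      have hjj : jj < (s.zip p).length := by omega
      have hjjp : jj < p.length := by omega
      rw [if_pos (by positivity), show ((jj+1:Nat):Int) - 1 = ((jj:Nat):Int) by push_cast; ring,
        PySem.List.pyGetD_natCast]
      have : ([("#", (0:Int))] ++ s.zip p ++ [("$", (0:Int))]).getD (jj+1) ("",0)
          = (s.zip p ++ [("$", (0:Int))]).getD jj ("",0) := by
        simp [List.getD]
      rw [this, List.getD_eq_getElem?_getD, List.getElem?_append_left hjj,
        List.getElem?_eq_getElem hjj, List.getD_eq_getElem?_getD,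
        List.getElem?_eq_getElem hjjp]
      simp [List.getElem_zip]
  -- A's fpro equals B's fpro
  have hfpro : (PySem.List.pyGetD ([("#", (0:Int))] ++ s.zip p ++ [("$", (0:Int))]) (((j:Int)+1) + 1) ("", 0)).2
      = (if (j:Int) + 1 < (((s.zip p).length : Int)) then PySem.List.pyGetD p ((j:Int) + 1) 0 else 0) := by
    rw [show ((j:Int)+1) + 1 = ((j+2:Nat):Int) by push_cast; ring, PySem.List.pyGetD_natCast]
    have : ([("#", (0:Int))] ++ s.zip p ++ [("$", (0:Int))]).getD (j+2) ("",0)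
        = (s.zip p ++ [("$", (0:Int))]).getD (j+1) ("",0) := by
      simp [List.getD]
    rw [this]
    by_cases hlt : j + 1 < (s.zip p).length
    · rw [if_pos (by exact_mod_cast hlt),
        show ((j:Int)) + 1 = ((j+1:Nat):Int) by push_cast; ring, PySem.List.pyGetD_natCast]
      have hlp : j + 1 < p.length := by omega
      rw [List.getD_eq_getElem?_getD, List.getElem?_append_left hlt,
        List.getElem?_eq_getElem hlt, List.getD_eq_getElem?_getD,
        List.getElem?_eq_getElem hlp]
      simp [List.getElem_zip]
    · have hle : j + 1 = (s.zip p).length := by omega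
      rw [if_neg (by exact_mod_cast hlt), List.getD_eq_getElem?_getD, hle,
        List.getElem?_append_right (le_refl _)]
      simp
  -- A's suffix membership equals B's table lookup
  have hslice : ((7:Int) ∈ PySem.List.slice p (some ((j:Int)+1)) none)
      ↔ (PySem.List.pyGetD (pvSuffix7 p) ((j:Int) + 1) false = true) := by
    rw [show ((j:Int)+1) = ((j+1:Nat):Int) by push_cast; ring, PySem.List.slice_from_natCast,
      PySem.List.pyGetD_natCast, pvSuffix7_getD p (j+1) (by omega)]
    simp
  -- the yielded slice
  have hyield : PySem.List.slice s (some (a:Int)) (some (j:Int)) = List.take (j-a) (List.drop a s) :=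
    PySem.List.slice_natCast s a j
  -- syllable extension
  have hext : List.take (j-a) (List.drop a s) ++ [s[j]] = List.take (j+1-a) (List.drop a s) := by
    rw [show j+1-a = (j-a)+1 by omega, List.take_add_one]
    have : (List.drop a s)[j-a]? = some s[j] := by
      rw [List.getElem?_drop, show a+(j-a) = j by omega, List.getElem?_eq_getElem hjs]
    simp [this]
  have hnew : List.take 1 (List.drop j s) = [s[j]] := by
    rw [List.drop_eq_getElem_cons hjs, List.take_succ_cons, List.take_zero]
  have hPROs : PySem.List.pyGetD p ((j:Nat):Int) 0 = p[j] := by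
    rw [PySem.List.pyGetD_natCast, List.getD_eq_getElem?_getD, List.getElem?_eq_getElem hjp]; rfl
  simp only [pvStepA, pvStepB, hget, PySem.Set.mem_ofList]
  rw [hppro, hfpro, hPROs]
  set PP := (if 0 < (j:Int) then PySem.List.pyGetD p ((j:Int) - 1) 0 else 0) with hPP
  set FP := (if (j:Int) + 1 < (((s.zip p).length : Int)) then PySem.List.pyGetD p ((j:Int) + 1) 0 else 0) with hFP
  simp only [hslice, hyield]
  set VC := (if p[j] ∈ vw then vc + 1 else vc) with hVC
  by_cases h0 : FP ∈ tn
  · -- tone follows: no break on either side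
    refine ⟨a, by omega, ?_, ?_⟩
    · rw [if_neg (by tauto), if_neg (by tauto)]
    · rw [if_neg (by tauto)]
      simp [hext]
  · by_cases h1 : (PP ≥ p[j] ∧ p[j] < FP ∧ VC ≠ 0 ∧ PySem.List.pyGetD (pvSuffix7 p) ((j:Int) + 1) false = true) ∨ PP ∈ tn
    · refine ⟨j, by omega, ?_, ?_⟩
      · rw [if_pos ⟨h0, by tauto⟩, if_pos (by tauto), if_pos h1]
      · rw [if_pos (by tauto), if_pos h1]
        simp [hnew]
    · by_cases h2 : VC > mv ∧ p[j] ∈ vw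
      · refine ⟨j, by omega, ?_, ?_⟩
        · rw [if_pos ⟨h0, by tauto⟩, if_pos (by tauto), if_neg h1, if_pos h2]
        · rw [if_pos (by tauto), if_neg h1, if_pos h2]
          simp [hnew]
      · by_cases h3 : PP ∈ vw ∧ p[j] ∉ vw ∧ FP > p[j]
        · refine ⟨j, by omega, ?_, ?_⟩
          · rw [if_pos ⟨h0, by tauto⟩, if_pos (by tauto), if_neg h1, if_neg h2, if_pos h3]
          · rw [if_pos (by tauto), if_neg h1, if_neg h2, if_pos h3]
            simp [hnew]
        · refine ⟨a, by omega, ?_, ?_⟩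
          · rw [if_neg (by tauto), if_pos (by tauto), if_neg h1, if_neg h2, if_neg h3]
          · rw [if_pos (by tauto), if_neg h1, if_neg h2, if_neg h3]
            simp [hext]

-- the two loops, each with its finalization, agree from any aligned intermediate state
lemma pv_loop (s : List String) (p vw tn : List Int) (mv : Int) :
    ∀ (k j a : Nat) (out : List (List String)) (vc : Int),
      j + k = (s.zip p).length → a ≤ j →
      (let r := (PySem.List.enumerate ((s.zip p).drop j) ((j:Int)+1)).foldl
          (pvStepA ([("#", (0:Int))] ++ s.zip p ++ [("$", (0:Int))]) p vw tn mv)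
          (out, List.take (j-a) (List.drop a s), vc)
       if r.2.1 ≠ [] then r.1 ++ [r.2.1] else r.1)
      =
      (let r := (PySem.List.pyRange (j:Int) (((s.zip p).length:Int)) 1).foldl
          (pvStepB s p (PySem.Set.ofList vw) (PySem.Set.ofList tn) mv (((s.zip p).length:Int)) (pvSuffix7 p)) (out, (a:Int), vc)
       if r.2.1 < (((s.zip p).length:Int)) then
         r.1 ++ [PySem.List.slice s (some r.2.1) (some (((s.zip p).length:Int)))]
       else r.1) := by
  intro k
  induction k with
  | zero =>
    intro j a out vc hk ha
    have hj : j = (s.zip p).length := by omega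
    have hns : (s.zip p).length ≤ s.length := by rw [List.length_zip]; omega
    have hnp : (s.zip p).length ≤ p.length := by rw [List.length_zip]; omega
    subst hj
    rw [List.drop_length]
    simp only [PySem.List.enumerate_nil, List.foldl_nil,
      show PySem.List.pyRange ((s.zip p).length:Int) ((s.zip p).length:Int) 1 = [] from by simp [pysem]]
    by_cases hlt : a < (s.zip p).length
    · rw [if_pos ?_, if_pos (by exact_mod_cast hlt), PySem.List.slice_natCast]
      · have hlen : (List.take ((s.zip p).length - a) (List.drop a s)).length
            = (s.zip p).length - a := by
          simp [List.length_take, List.length_drop]; omega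
        intro hnil
        rw [hnil] at hlen
        simp at hlen
        omega
    · have haeq : a = (s.zip p).length := by omega
      rw [if_neg (by simp [haeq]), if_neg (by exact_mod_cast hlt)]
  | succ k ih =>
    intro j a out vc hk ha
    have hj : j < (s.zip p).length := by omega
    rw [List.drop_eq_getElem_cons hj, PySem.List.enumerate_cons, List.foldl_cons,
      PySem.List.pyRange_one_cons (by exact_mod_cast hj), List.foldl_cons]
    obtain ⟨a', ha', hB, hsyl⟩ := pv_step s p vw tn mv j a out vc hj ha
    rw [hB]
    set X := pvStepA ([("#", (0:Int))] ++ s.zip p ++ [("$", (0:Int))]) p vw tn mv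
        (out, List.take (j-a) (List.drop a s), vc) ((j:Int)+1, (s.zip p)[j]) with hX
    have hXeta : X = (X.1, List.take ((j+1)-a') (List.drop a' s), X.2.2) := by
      rw [← hsyl]
    rw [hXeta]
    have h := ih (j+1) a' X.1 X.2.2 (by omega) ha'
    push_cast at h
    exact h

theorem iter_syllables_py_spec : Claim_equal_iter_syllables_py := by
  intro s p vw tn mv _
  simp only [Spec_iter_syllables_py, iter_syllables_py, iter_syllables_py_alt]
  have hsl : PySem.List.slice ([("#",(0:Int))] ++ s.zip p ++ [("$",(0:Int))]) (some 1) (some (-1)) = s.zip p := by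
    simp [PySem.List.slice, PySem.List.clampIdx]
    rw [if_neg (by omega)]
    have hlz : ((min (s.length:Int) (p.length:Int) + 1).toNat - 1) = (s.zip p).length := by
      rw [List.length_zip]; omega
    rw [hlz]
    exact List.take_left
  have hmin : (((s.zip p).length:Nat):Int) = min (s.length:Int) (p.length:Int) := by
    rw [List.length_zip]; push_cast; rfl
  have h := pv_loop s p vw tn mv ((s.zip p).length) 0 0 [] 0 (by omega) (by omega)
  rw [hsl, ← hmin]
  exact h
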